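-- pv_equiv track=rewrite | github.com/artharth7482/507final_project | app.py | higher_round
-- ===== SOURCE A (Python) =====
-- def higher_round(list):
--     result = "Haven't won any game :("
--     for i in list:
--         if "The Final" in i:
--             result = "The Final"
--         elif "Semifinals" in i:
--             result = "Semifinals"
--         elif "Quarterfinals" in i:
--             result = "Quarterfinals"
--         elif "4th Round" in i:
--             result = "4th Round"
--         elif "3rd Round" in i:
--             result = "3rd Round"
--         elif "2nd Round" in i:
--             result = "2nd Round"
--         elif "1st Round" in i:
--             result = "1st Round"
--     return result
-- ===== SOURCE B (Python) =====
-- ROUNDS = ("The Final", "Semifinals", "Quarterfinals",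
--           "4th Round", "3rd Round", "2nd Round", "1st Round")
--
-- def higher_round(list):
--     for i in reversed(list):
--         for name in ROUNDS:
--             if name in i:
--                 return name
--     return "Haven't won any game :("
-- ===== Notes on version B (the rewrite author's own statement) =====
-- stated objective: alternative
-- what changed: Replaces the forward full-pass fold that overwrites an accumulator with a reverse scan that returns immediately at the first element matching any round name (priority resolved by a first-match over a name tuple), so the list tail is never fully traversed past the last match.
import Mathlib
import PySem

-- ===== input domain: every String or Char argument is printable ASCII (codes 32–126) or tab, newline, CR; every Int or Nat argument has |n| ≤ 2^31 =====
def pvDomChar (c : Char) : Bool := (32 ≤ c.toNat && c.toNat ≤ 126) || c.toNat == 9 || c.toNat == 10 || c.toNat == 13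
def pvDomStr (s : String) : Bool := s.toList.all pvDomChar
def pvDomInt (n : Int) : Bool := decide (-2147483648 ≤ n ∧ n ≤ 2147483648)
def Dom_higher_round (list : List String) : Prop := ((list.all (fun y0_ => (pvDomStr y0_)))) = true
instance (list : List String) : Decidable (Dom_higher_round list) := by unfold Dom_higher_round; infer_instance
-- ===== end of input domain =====

-- B replaces A's forward overwrite-accumulator fold with a reverse scan returning
-- at the first element matching any round name (alternative decomposition, same cost class).


-- ===== PORT A =====
def higher_round (list : List String) : String :=
  list.foldl (fun result i =>
    if PySem.Str.isIn "The Final" i then "The Final"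
    else if PySem.Str.isIn "Semifinals" i then "Semifinals"
    else if PySem.Str.isIn "Quarterfinals" i then "Quarterfinals"
    else if PySem.Str.isIn "4th Round" i then "4th Round"
    else if PySem.Str.isIn "3rd Round" i then "3rd Round"
    else if PySem.Str.isIn "2nd Round" i then "2nd Round"
    else if PySem.Str.isIn "1st Round" i then "1st Round"
    else result) "Haven't won any game :("

-- ===== PORT B =====
def hrRounds : List String :=
  ["The Final", "Semifinals", "Quarterfinals", "4th Round", "3rd Round", "2nd Round", "1st Round"]

-- the inner 'for name in ROUNDS: if name in i: return name' loop
def hrClassify (i : String) : Option String :=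
  hrRounds.find? (fun name => PySem.Str.isIn name i)

-- the outer 'for i in reversed(list)' loop with early return
def hrScan : List String → String
  | [] => "Haven't won any game :("
  | i :: rest =>
    match hrClassify i with
    | some name => name
    | none => hrScan rest

def higher_round_alt (list : List String) : String := hrScan list.reverse

-- ===== PRECONDITION & SPEC =====
def Spec_higher_round (list : List String) (out : String) : Prop := out = higher_round_alt list
instance (list : List String) (out : String) : Decidable (Spec_higher_round list out) := by unfold Spec_higher_round; infer_instance

-- ===== CLAIM (what is proved, stated in full; the proofs are below) =====
def Claim_equal_higher_round : Prop := ∀ (list : List String), Dom_higher_round list → Spec_higher_round list (higher_round list)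

-- ===== LEMMAS AND PROOFS =====

-- A's if-chain step equals 'resolve classification, else keep the accumulator'
theorem hr_step_eq (r i : String) :
    (if PySem.Str.isIn "The Final" i then "The Final"
     else if PySem.Str.isIn "Semifinals" i then "Semifinals"
     else if PySem.Str.isIn "Quarterfinals" i then "Quarterfinals"
     else if PySem.Str.isIn "4th Round" i then "4th Round"
     else if PySem.Str.isIn "3rd Round" i then "3rd Round"
     else if PySem.Str.isIn "2nd Round" i then "2nd Round"
     else if PySem.Str.isIn "1st Round" i then "1st Round"
     else r) = (hrClassify i).getD r := by
  simp only [hrClassify, hrRounds, List.find?]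
  split_ifs <;> simp_all

-- hrScan with an arbitrary default in place of the sentinel
def hrScanD : List String → String → String
  | [], r => r
  | i :: rest, r =>
    match hrClassify i with
    | some name => name
    | none => hrScanD rest r

theorem hrScanD_sentinel (l : List String) : hrScanD l "Haven't won any game :(" = hrScan l := by
  induction l with
  | nil => rfl
  | cons i rest ih => simp only [hrScanD, hrScan, ih]

theorem hr_foldl_eq (l : List String) (r : String) :
    l.foldl (fun result i => (hrClassify i).getD result) r = hrScanD l.reverse r := by
  induction l using List.reverseRecOn with
  | nil => rfl
  | append_singleton l' a ih =>
    simp only [List.foldl_append, List.foldl_cons, List.foldl_nil, ih,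
      List.reverse_append, List.reverse_cons, List.reverse_nil, List.nil_append,
      List.cons_append, hrScanD]
    cases hrClassify a <;> rfl

-- ===== VERDICT (by name: the statement is the Claim_ definition above) =====
theorem higher_round_spec : Claim_equal_higher_round := by
  intro list _
  unfold Spec_higher_round higher_round higher_round_alt
  have : (fun (result i : String) =>
      if PySem.Str.isIn "The Final" i then "The Final"
      else if PySem.Str.isIn "Semifinals" i then "Semifinals"
      else if PySem.Str.isIn "Quarterfinals" i then "Quarterfinals"
      else if PySem.Str.isIn "4th Round" i then "4th Round"
      else if PySem.Str.isIn "3rd Round" i then "3rd Round"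
      else if PySem.Str.isIn "2nd Round" i then "2nd Round"
      else if PySem.Str.isIn "1st Round" i then "1st Round"
      else result) = (fun result i => (hrClassify i).getD result) := by
    funext r i; exact hr_step_eq r i
  rw [this, hr_foldl_eq, hrScanD_sentinel]
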